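-- pv_equiv track=rewrite | github.com/kimhhyeonjin/Algorithm | 프로그래머스/1/17681. ［1차］ 비밀지도/［1차］ 비밀지도.py | solution
-- ===== SOURCE A (Python) =====
-- def solution(n, arr1, arr2):
--     answer = []
--
--     for a in range(n):
--         a1 = '0' * (n - len(bin(arr1[a])[2:])) + bin(arr1[a])[2:]
--         a2 = '0' * (n - len(bin(arr2[a])[2:])) + bin(arr2[a])[2:]
--         temp = ''
--         for i in range(n):
--             if a1[i] == '0' and a2[i] == '0':
--                 temp += ' '
--             else:
--                 temp += '#'
--         answer.append(temp)
--     return answer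
-- ===== SOURCE B (Python) =====
-- def solution(n, arr1, arr2):
--     rows = []
--     for a in range(n):
--         marks = set()
--         for v in (arr1[a], arr2[a]):
--             t = bin(v)[2:].zfill(n)
--             marks.update(i for i in range(n) if t[i] != '0')
--         rows.append(''.join('#' if i in marks else ' ' for i in range(n)))
--     return rows
-- ===== Notes on version B (the rewrite author's own statement) =====
-- stated objective: alternative
-- what changed: Each row is built by collecting the SET of '#' positions (the union, over the two layers, of the indices holding a non-'0' character in the layer's zero-filled binary string) and then rendering the row by set membership, instead of A's positional character-by-character comparison of two separately hand-padded binary strings.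
import Mathlib
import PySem

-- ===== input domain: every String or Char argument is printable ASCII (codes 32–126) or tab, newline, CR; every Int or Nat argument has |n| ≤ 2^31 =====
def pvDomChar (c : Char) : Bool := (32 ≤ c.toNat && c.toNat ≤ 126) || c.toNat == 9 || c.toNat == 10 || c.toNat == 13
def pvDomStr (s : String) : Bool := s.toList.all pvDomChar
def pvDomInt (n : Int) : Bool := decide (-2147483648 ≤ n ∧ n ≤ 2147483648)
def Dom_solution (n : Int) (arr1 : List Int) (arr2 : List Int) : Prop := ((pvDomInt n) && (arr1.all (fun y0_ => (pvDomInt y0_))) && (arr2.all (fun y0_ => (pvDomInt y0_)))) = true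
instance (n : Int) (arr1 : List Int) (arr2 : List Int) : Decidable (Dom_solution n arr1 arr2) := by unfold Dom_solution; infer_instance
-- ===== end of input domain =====

-- B builds, per row, the SET of '#' positions (union of the two layers' non-'0'
-- positions in their zero-filled binary strings) and renders the row by set
-- membership, instead of A's character-by-character comparison of two separately
-- padded binary strings; objective: alternative (a set-based decomposition).

-- ===== PORT A =====
def solution (n : Int) (arr1 : List Int) (arr2 : List Int) : List String :=
  (PySem.List.pyRange 0 n 1).foldl (fun answer a =>
    let v1 := PySem.List.pyGetD arr1 a 0
    let v2 := PySem.List.pyGetD arr2 a 0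
    let b1 := PySem.List.slice (PySem.Int.toBinChars0b v1) (some 2) none
    let b2 := PySem.List.slice (PySem.Int.toBinChars0b v2) (some 2) none
    let a1 := List.replicate (n - PySem.List.len b1).toNat '0' ++ b1
    let a2 := List.replicate (n - PySem.List.len b2).toNat '0' ++ b2
    let temp := (PySem.List.pyRange 0 n 1).foldl (fun temp i =>
      if PySem.List.pyGetD a1 i ' ' = '0' ∧ PySem.List.pyGetD a2 i ' ' = '0'
      then temp ++ [' '] else temp ++ ['#']) ([] : List Char)
    answer ++ [String.ofList temp]) []

-- ===== PORT B =====
def solution_alt (n : Int) (arr1 : List Int) (arr2 : List Int) : List String :=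
  (PySem.List.pyRange 0 n 1).foldl (fun rows a =>
    let marks := [PySem.List.pyGetD arr1 a 0, PySem.List.pyGetD arr2 a 0].foldl
      (fun marks v =>
        let t := PySem.Chars.zfill
          (PySem.List.slice (PySem.Int.toBinChars0b v) (some 2) none) n
        PySem.Set.update marks
          ((PySem.List.pyRange 0 n 1).filter (fun i => PySem.List.pyGetD t i ' ' != '0')))
      (PySem.Set.ofList ([] : List Int))
    rows ++ [String.ofList ((PySem.List.pyRange 0 n 1).map
      (fun i => if PySem.Set.contains marks i then '#' else ' '))]) []

-- ===== PRECONDITION & SPEC =====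
-- Pre_ excludes exactly the inputs on which A raises IndexError: n larger than the
-- length of one of the two arrays.
def Pre_solution (n : Int) (arr1 : List Int) (arr2 : List Int) : Prop :=
  n ≤ (arr1.length : Int) ∧ n ≤ (arr2.length : Int)
instance (n : Int) (arr1 : List Int) (arr2 : List Int) : Decidable (Pre_solution n arr1 arr2) := by
  unfold Pre_solution; infer_instance

def pvWitness_solution : Int × List Int × List Int := (2, [1, 2], [2, 1])

def Spec_solution (n : Int) (arr1 : List Int) (arr2 : List Int) (out : List String) : Prop := out = solution_alt n arr1 arr2
instance (n : Int) (arr1 : List Int) (arr2 : List Int) (out : List String) : Decidable (Spec_solution n arr1 arr2 out) := by unfold Spec_solution; infer_instance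

-- ===== CLAIM (what is proved, stated in full; the proofs are below) =====
def Claim_equal_solution : Prop := ∀ (n : Int) (arr1 : List Int) (arr2 : List Int), Dom_solution n arr1 arr2 → Pre_solution n arr1 arr2 → Spec_solution n arr1 arr2 (solution n arr1 arr2)

-- ===== LEMMAS AND PROOFS =====

-- msb-first binary digits of a natural number (what Nat.toDigits 2 computes)
def pvBits (m : Nat) : List Char :=
  if m < 2 then [Nat.digitChar m] else pvBits (m / 2) ++ [Nat.digitChar (m % 2)]

theorem pvToDigitsCore_eq (n : Nat) : ∀ (f : Nat) (l : List Char), n < f →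
    Nat.toDigitsCore 2 f n l = pvBits n ++ l := by
  induction n using Nat.strong_induction_on with
  | _ n ih =>
    intro f l hf
    match f with
    | f + 1 =>
      rw [Nat.toDigitsCore]
      by_cases h2 : n < 2
      · have : n / 2 = 0 := by omega
        simp [this, pvBits, h2]
        congr 1
        omega
      · have hne : ¬ n / 2 = 0 := by omega
        simp only [hne, if_false]
        rw [ih (n / 2) (by omega) f _ (by omega)]
        conv_rhs => rw [pvBits]
        simp [h2, List.append_assoc]

theorem pvToDigits_eq (n : Nat) : Nat.toDigits 2 n = pvBits n :=
  by simpa using pvToDigitsCore_eq n (n + 1) [] (by omega)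

theorem pvBits_head {m : Nat} : ∃ c l, pvBits m = c :: l ∧ c ≠ '+' ∧ c ≠ '-' := by
  rw [pvBits]
  by_cases h2 : m < 2
  · refine ⟨Nat.digitChar m, [], by simp [h2], ?_, ?_⟩ <;> interval_cases m <;> decide
  · simp only [h2, if_false]
    obtain ⟨c, l, he, h⟩ := pvBits_head (m := m / 2)
    exact ⟨c, l ++ [Nat.digitChar (m % 2)], by simp [he], h⟩

theorem pvZfill_eq {c : Char} {rest : List Char} (w : Int) (h1 : c ≠ '+') (h2 : c ≠ '-') :
    PySem.Chars.zfill (c :: rest) w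
      = List.replicate (w.toNat - (c :: rest).length) '0' ++ (c :: rest) := by
  rw [PySem.Chars.zfill]
  by_cases hw : w ≤ ((c :: rest).length : Int)
  · rw [if_pos hw]
    have h0 : w.toNat - (c :: rest).length = 0 := by
      simp only [List.length_cons] at hw ⊢; omega
    rw [h0, List.replicate_zero, List.nil_append]
  · rw [if_neg hw, if_neg (show ¬(c = '+' ∨ c = '-') by tauto)]

-- A's hand-padded binary string IS zfill of bin(v)[2:], for every Int v (the first
-- character of bin(v)[2:] is a digit or 'b', never a sign)
theorem pvPad_eq_zfill (v : Int) (n : Int) (hn : 0 ≤ n) :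
    List.replicate
        (n - PySem.List.len (PySem.List.slice (PySem.Int.toBinChars0b v) (some 2) none)).toNat '0'
      ++ PySem.List.slice (PySem.Int.toBinChars0b v) (some 2) none
    = PySem.Chars.zfill (PySem.List.slice (PySem.Int.toBinChars0b v) (some 2) none) n := by
  have hslice : PySem.List.slice (PySem.Int.toBinChars0b v) (some 2) none
      = (PySem.Int.toBinChars0b v).drop 2 := by
    rw [PySem.List.slice_from _ (by norm_num)]
    rfl
  obtain ⟨c, l, hcl, hcp, hcm⟩ : ∃ c l,
      (PySem.Int.toBinChars0b v).drop 2 = c :: l ∧ c ≠ '+' ∧ c ≠ '-' := by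
    rw [PySem.Int.toBinChars0b]
    by_cases hv : v < 0
    · exact ⟨'b', Nat.toDigits 2 v.natAbs, by simp [hv], by decide, by decide⟩
    · obtain ⟨c, l, he, h1, h2⟩ := pvBits_head (m := v.toNat)
      exact ⟨c, l, by simp [hv, pvToDigits_eq, he], h1, h2⟩
  rw [hslice, hcl, pvZfill_eq n hcp hcm, PySem.List.len_eq]
  congr 2
  omega

theorem solution_spec : Claim_equal_solution := by
  intro n arr1 arr2 _ _
  unfold Spec_solution solution solution_alt
  rw [PySem.List.foldl_append_singleton_eq_map
    (fun a =>
      let v1 := PySem.List.pyGetD arr1 a 0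
      let v2 := PySem.List.pyGetD arr2 a 0
      let b1 := PySem.List.slice (PySem.Int.toBinChars0b v1) (some 2) none
      let b2 := PySem.List.slice (PySem.Int.toBinChars0b v2) (some 2) none
      let a1 := List.replicate (n - PySem.List.len b1).toNat '0' ++ b1
      let a2 := List.replicate (n - PySem.List.len b2).toNat '0' ++ b2
      String.ofList ((PySem.List.pyRange 0 n 1).foldl (fun temp i =>
        if PySem.List.pyGetD a1 i ' ' = '0' ∧ PySem.List.pyGetD a2 i ' ' = '0'
        then temp ++ [' '] else temp ++ ['#']) ([] : List Char))),
    PySem.List.foldl_append_singleton_eq_map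
    (fun a =>
      let marks := [PySem.List.pyGetD arr1 a 0, PySem.List.pyGetD arr2 a 0].foldl
        (fun marks v =>
          let t := PySem.Chars.zfill
            (PySem.List.slice (PySem.Int.toBinChars0b v) (some 2) none) n
          PySem.Set.update marks
            ((PySem.List.pyRange 0 n 1).filter (fun i => PySem.List.pyGetD t i ' ' != '0')))
        (PySem.Set.ofList ([] : List Int))
      String.ofList ((PySem.List.pyRange 0 n 1).map
        (fun i => if PySem.Set.contains marks i then '#' else ' '))),
    List.nil_append, List.nil_append]
  apply List.map_congr_left
  intro a ha
  rw [PySem.List.mem_pyRange_one] at ha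
  have hn0 : (0 : Int) ≤ n := le_of_lt (lt_of_le_of_lt ha.1 ha.2)
  simp only
  rw [pvPad_eq_zfill _ n hn0, pvPad_eq_zfill _ n hn0]
  -- the inner character loop of A is a map
  have hbody : ∀ t1 t2 : List Char, (fun (temp : List Char) (i : Int) =>
      if PySem.List.pyGetD t1 i ' ' = '0' ∧ PySem.List.pyGetD t2 i ' ' = '0'
      then temp ++ [' '] else temp ++ ['#'])
      = fun temp i => temp ++ [if PySem.List.pyGetD t1 i ' ' = '0' ∧ PySem.List.pyGetD t2 i ' ' = '0' then ' ' else '#'] := by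
    intro t1 t2
    funext temp i
    split_ifs <;> rfl
  rw [hbody, PySem.List.foldl_append_singleton_eq_map, List.nil_append]
  -- B's mark set, unfolded over the two layers
  simp only [List.foldl_cons, List.foldl_nil]
  congr 1
  apply List.map_congr_left
  intro i hi
  rw [PySem.List.mem_pyRange_one] at hi
  by_cases h1 : PySem.List.pyGetD (PySem.Chars.zfill
      (PySem.List.slice (PySem.Int.toBinChars0b (PySem.List.pyGetD arr1 a 0)) (some 2) none) n)
      i ' ' = '0' <;>
    by_cases h2 : PySem.List.pyGetD (PySem.Chars.zfill
      (PySem.List.slice (PySem.Int.toBinChars0b (PySem.List.pyGetD arr2 a 0)) (some 2) none) n)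
      i ' ' = '0' <;>
    simp [PySem.Set.mem_update, List.mem_filter, PySem.List.mem_pyRange_one,
      bne_iff_ne, hi.1, hi.2, h1, h2]
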